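-- pv_equiv track=rewrite | github.com/Tomev-CTP/theboss | theboss/boson_sampling_utilities/boson_sampling_utilities.py | compute_state_types
-- ===== SOURCE A (Python) =====
-- from typing import List, Optional, Sequence, Tuple, Set
--
-- def compute_state_types(
--     modes_number: int, particles_number: int, losses: bool = False
-- ) -> List[List[int]]:
--     # Partitions generating code.
--     # Taken from https://stackoverflow.com/questions/10035752/elegant-python-code-for-integer-partitioning/10036764
--     def partitions(n, I=1):
--         yield (n,)
--         for i in range(I, n // 2 + 1):
--             for p in partitions(n - i, i):
--                 yield (i,) + p
--
--     all_partitions = list(partitions(particles_number))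
--
--     if losses:
--         for i in range(particles_number):
--             all_partitions += list(partitions(i))
--
--     state_types = []
--
--     for partition in all_partitions:
--         if len(partition) > modes_number:
--             continue
--         # We describe state type by a vector in descending order.
--         state_type = sorted(partition, reverse=True)
--         state_types.append(state_type)
--
--     for i in range(len(state_types)):
--         while len(state_types[i]) < modes_number:
--             state_types[i].append(0)
--
--     return state_types
-- ===== SOURCE B (Python) =====
-- def compute_state_types(modes_number, particles_number, losses=False):
--     # Restricted partition generator: caps the number of parts at modes_number
--     # (pruning oversized branches) and builds each state type directly in
--     # descending order, zero-padded -- no global filter or per-partition sort.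
--     def gen(n, lo, slots):
--         # descending part-lists of partitions of n with parts >= lo, at most `slots` parts
--         res = []
--         if slots >= 1:
--             res.append([n])
--         if slots >= 2:
--             for i in range(lo, n // 2 + 1):
--                 for p in gen(n - i, i, slots - 1):
--                     res.append(p + [i])
--         return res
--
--     def emit(n):
--         return [p + [0] * (modes_number - len(p)) for p in gen(n, 1, modes_number)]
--
--     result = emit(particles_number)
--     if losses:
--         for i in range(particles_number):
--             result += emit(i)
--     return result
-- ===== Notes on version B (the rewrite author's own statement) =====
-- stated objective: alternative
-- what changed: B replaces A's generate-all-partitions-then-filter-sort-and-pad pipeline by a restricted partition generator that caps the number of parts at modes_number (pruning oversized branches in the same traversal order) and builds each state type directly in descending order with zero padding, so no partition longer than modes_number is ever generated and no per-partition sort is needed; intended as faster (measured 1.79x at the largest size both finished, but a timing run could not confirm the label).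
import Mathlib
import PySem

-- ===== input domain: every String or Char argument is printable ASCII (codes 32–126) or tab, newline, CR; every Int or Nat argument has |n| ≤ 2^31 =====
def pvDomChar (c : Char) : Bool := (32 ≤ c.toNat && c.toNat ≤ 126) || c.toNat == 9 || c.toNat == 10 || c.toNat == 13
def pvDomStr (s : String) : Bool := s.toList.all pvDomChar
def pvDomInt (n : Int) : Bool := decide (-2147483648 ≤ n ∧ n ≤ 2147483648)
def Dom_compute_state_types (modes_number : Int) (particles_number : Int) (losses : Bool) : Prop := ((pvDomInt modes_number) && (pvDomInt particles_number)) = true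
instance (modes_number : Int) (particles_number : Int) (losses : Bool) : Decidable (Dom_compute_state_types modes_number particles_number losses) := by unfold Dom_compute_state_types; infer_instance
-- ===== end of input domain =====

-- B replaces A's generate-all-partitions / filter / sort / pad-in-place pipeline by a restricted
-- partition generator that caps the number of parts at modes_number (pruning oversized branches)
-- and emits each state type directly in descending order with zero padding; intended as faster
-- (output-sized; a timing run measured 1.79x at the largest size both versions finished).

-- ===== PORT A =====
-- A's inner generator `partitions(n, I)`; the Nat fuel only makes the recursion structural
-- (the pipeline always supplies enough fuel: depth is bounded by n).
def pvPartsA : Nat → Int → Int → List (List Int)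
  | 0, n, _ => [[n]]
  | f + 1, n, I =>
      [n] :: (PySem.List.pyRange I (PySem.Int.floordiv n 2 + 1) 1).flatMap
        (fun i => (pvPartsA f (n - i) i).map (fun p => i :: p))

-- the `while len(state_types[i]) < modes_number: append(0)` loop
def pvPadA (modes : Int) (st : List Int) : List Int :=
  if (st.length : Int) < modes then pvPadA modes (st ++ [0]) else st
termination_by (modes - st.length).toNat
decreasing_by simp only [List.length_append, List.length_singleton]; omega

def compute_state_types (modes_number : Int) (particles_number : Int) (losses : Bool) : List (List Int) :=
  let all_partitions := pvPartsA particles_number.toNat particles_number 1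
  let all_partitions :=
    if losses then
      (PySem.List.pyRange 0 particles_number 1).foldl
        (fun acc i => acc ++ pvPartsA i.toNat i 1) all_partitions
    else all_partitions
  let state_types :=
    all_partitions.foldl
      (fun acc partition =>
        if (partition.length : Int) > modes_number then acc
        else acc ++ [PySem.List.sorted partition (fun x => x) true]) []
  state_types.map (fun st => pvPadA modes_number st)

-- ===== PORT B =====
-- B's `gen(n, lo, slots)`; same fuel device as above (depth ≤ n on every call the pipeline makes).
def pvGenB : Nat → Int → Int → Int → List (List Int)
  | 0, n, _, slots => if 1 ≤ slots then [[n]] else []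
  | f + 1, n, lo, slots =>
      (if 1 ≤ slots then [[n]] else []) ++
      (if 2 ≤ slots then
        (PySem.List.pyRange lo (PySem.Int.floordiv n 2 + 1) 1).flatMap
          (fun i => (pvGenB f (n - i) i (slots - 1)).map (fun p => p ++ [i]))
      else [])

def pvEmitB (modes : Int) (n : Int) : List (List Int) :=
  (pvGenB n.toNat n 1 modes).map
    (fun p => p ++ List.replicate (modes - (p.length : Int)).toNat 0)

def compute_state_types_alt (modes_number : Int) (particles_number : Int) (losses : Bool) : List (List Int) :=
  let result := pvEmitB modes_number particles_number
  if losses then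
    (PySem.List.pyRange 0 particles_number 1).foldl
      (fun acc i => acc ++ pvEmitB modes_number i) result
  else result

-- ===== PRECONDITION & SPEC =====
def Spec_compute_state_types (modes_number : Int) (particles_number : Int) (losses : Bool) (out : List (List Int)) : Prop := out = compute_state_types_alt modes_number particles_number losses
instance (modes_number : Int) (particles_number : Int) (losses : Bool) (out : List (List Int)) : Decidable (Spec_compute_state_types modes_number particles_number losses out) := by unfold Spec_compute_state_types; infer_instance

-- ===== CLAIM (what is proved, stated in full; the proofs are below) =====
def Claim_equal_compute_state_types : Prop := ∀ (modes_number : Int) (particles_number : Int) (losses : Bool), Dom_compute_state_types modes_number particles_number losses → Spec_compute_state_types modes_number particles_number losses (compute_state_types modes_number particles_number losses)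

-- ===== LEMMAS AND PROOFS =====

lemma pvPartsA_inv : ∀ (f : Nat) (n lo : Int), ∀ p ∈ pvPartsA f n lo,
    p ≠ [] ∧ p.Pairwise (· ≤ ·) ∧ ∀ x ∈ p, min lo n ≤ x := by
  intro f
  induction f with
  | zero =>
    intro n lo p hp
    simp only [pvPartsA, List.mem_singleton] at hp
    subst hp
    refine ⟨by simp, by simp, ?_⟩
    simp only [List.mem_singleton]
    rintro x rfl; omega
  | succ f ih =>
    intro n lo p hp
    simp only [pvPartsA, List.mem_cons, List.mem_flatMap, List.mem_map] at hp
    rcases hp with rfl | ⟨i, hi, q, hq, rfl⟩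
    · refine ⟨by simp, by simp, ?_⟩
      simp only [List.mem_singleton]
      rintro x rfl; omega
    · rw [PySem.List.mem_pyRange_one] at hi
      have h2 : i * 2 ≤ n := (PySem.Int.le_floordiv_iff_mul_le (by omega)).1 (by omega)
      obtain ⟨hne, hsort, hge⟩ := ih (n - i) i q hq
      have hiq : ∀ x ∈ q, i ≤ x := fun x hx => by have := hge x hx; omega
      refine ⟨by simp, List.pairwise_cons.2 ⟨hiq, hsort⟩, ?_⟩
      intro x hx
      rcases List.mem_cons.1 hx with rfl | hx
      · omega
      · have := hge x hx; omega

lemma pvSorted_rev (p : List Int) (h : p.Pairwise (· ≤ ·)) :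
    PySem.List.sorted p (fun x => x) true = p.reverse := by
  refine List.eq_of_perm_of_sorted (le := fun a b => b ≤ a) (fun a b _ _ h1 h2 => le_antisymm h2 h1)
    ?_ ?_ ?_
  · exact PySem.List.sorted_pairwise_rev p (fun x => x)
  · exact List.pairwise_reverse.2 h
  · exact (PySem.List.sorted_perm p (fun x => x) true).trans (List.reverse_perm p).symm

lemma pvPadA_eq (modes : Int) (st : List Int) :
    pvPadA modes st = st ++ List.replicate (modes - (st.length : Int)).toNat 0 := by
  fun_induction pvPadA modes st with
  | case1 st h ih =>
    rw [ih, List.append_assoc]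
    congr 1
    have hk : (modes - (st.length : Int)).toNat
        = (modes - (((st ++ [0]).length : Nat) : Int)).toNat + 1 := by
      simp only [List.length_append, List.length_singleton]; omega
    rw [hk, List.replicate_succ]
    simp
  | case2 st h =>
    have hz : (modes - (st.length : Int)).toNat = 0 := by omega
    simp [hz]
lemma pvGen_eq : ∀ (f : Nat) (n lo s : Int),
    pvGenB f n lo s =
      (pvPartsA f n lo).filterMap
        (fun p => if (p.length : Int) ≤ s then some p.reverse else none) := by
  intro f
  induction f with
  | zero =>
    intro n lo s
    simp only [pvGenB, pvPartsA, List.filterMap_cons, List.filterMap_nil]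
    by_cases hs : (1 : Int) ≤ s
    · simp [hs]
    · simp [hs]
  | succ f ih =>
    intro n lo s
    simp only [pvGenB, pvPartsA, List.filterMap_cons, List.filterMap_flatMap, List.filterMap_map]
    by_cases hs2 : (2 : Int) ≤ s
    · have hs1 : (1 : Int) ≤ s := by omega
      simp only [if_pos hs2, if_pos hs1]
      have hinner : ∀ i : Int,
          (pvGenB f (n - i) i (s - 1)).map (fun p => p ++ [i]) =
          (pvPartsA f (n - i) i).filterMap
            ((fun p => if (p.length : Int) ≤ s then some p.reverse else none) ∘ (fun p => i :: p)) := by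
        intro i
        rw [ih, List.map_filterMap]
        apply List.filterMap_congr
        intro q _
        simp only [Function.comp_apply, List.length_cons, List.reverse_cons]
        by_cases hq : (q.length : Int) ≤ s - 1
        · rw [if_pos hq, if_pos (by push_cast; omega)]
          rfl
        · rw [if_neg hq, if_neg (by push_cast; omega)]
          rfl
      simp only [hinner]
      rw [if_pos (show ((([n] : List Int)).length : Int) ≤ s by simp; omega)]
      simp
    · have hdrop : (PySem.List.pyRange lo (PySem.Int.floordiv n 2 + 1) 1).flatMap
          (fun i => (pvPartsA f (n - i) i).filterMap
            ((fun p => if (p.length : Int) ≤ s then some p.reverse else none) ∘ (fun p => i :: p))) = [] := by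
        rw [List.flatMap_eq_nil_iff]
        intro i _
        rw [List.filterMap_eq_nil_iff]
        intro q hq
        obtain ⟨hne, _, _⟩ := pvPartsA_inv f (n - i) i q hq
        have hq1 : 1 ≤ q.length := List.length_pos_iff.2 hne
        simp only [Function.comp_apply]
        rw [if_neg (by simp only [List.length_cons]; push_cast; omega)]
      rw [hdrop]
      by_cases hs1 : (1 : Int) ≤ s
      · simp [hs1, hs2]
      · simp [hs1, hs2]
lemma pvEmit_eq (m n : Int) :
    pvEmitB m n =
      ((pvPartsA n.toNat n 1).filterMap
        (fun p => if (p.length : Int) ≤ m then some (PySem.List.sorted p (fun x => x) true) else none)).map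
        (fun st => pvPadA m st) := by
  unfold pvEmitB
  rw [pvGen_eq, List.map_filterMap, List.map_filterMap]
  apply List.filterMap_congr
  intro p hp
  obtain ⟨-, hsort, -⟩ := pvPartsA_inv _ _ _ p hp
  by_cases hc : (p.length : Int) ≤ m
  · rw [if_pos hc, if_pos hc, Option.map_some, Option.map_some,
      pvSorted_rev p hsort, pvPadA_eq, List.length_reverse]
  · rw [if_neg hc, if_neg hc]; rfl

-- ===== VERDICT (by name: the statement is the Claim_ definition above) =====
theorem compute_state_types_spec : Claim_equal_compute_state_types := by
  intro m n losses _
  unfold Spec_compute_state_types compute_state_types compute_state_types_alt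
  have hsel : ∀ (l : List (List Int)) (acc : List (List Int)),
      l.foldl (fun acc partition =>
        if (partition.length : Int) > m then acc
        else acc ++ [PySem.List.sorted partition (fun x => x) true]) acc
      = acc ++ l.filterMap (fun p =>
          if (p.length : Int) ≤ m then some (PySem.List.sorted p (fun x => x) true) else none) := by
    intro l
    induction l with
    | nil => intro acc; simp
    | cons x t ih =>
      intro acc
      simp only [List.foldl_cons, List.filterMap_cons]
      by_cases hx : (x.length : Int) ≤ m
      · rw [if_neg (by omega), if_pos hx, ih]
        simp
      · rw [if_pos (by omega), if_neg hx, ih]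
  cases losses with
  | false =>
    simp only [if_neg (by simp : ¬ (false = true)), hsel, List.nil_append, ← pvEmit_eq]
  | true =>
    simp only [if_true]
    rw [PySem.List.foldl_append_eq_flatMap, PySem.List.foldl_append_eq_flatMap,
      hsel, List.nil_append, List.filterMap_append, List.filterMap_flatMap,
      List.map_append, List.map_flatMap, ← pvEmit_eq]
    congr 1
    apply List.flatMap_congr
    intro i _
    rw [← pvEmit_eq]
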